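-- pv_equiv track=rewrite | github.com/LangeTreeDorpie/adventofcode | day5/part2.py | map_ranges
-- ===== SOURCE A (Python) =====
-- def merge_adjacent_ranges(seed_ranges):
--     seed_ranges = sorted(seed_ranges, key=lambda x: x[1])
--
--     merged = []
--     current_tuple = seed_ranges[0]
--
--     for tpl in seed_ranges[1:]:
--         if current_tuple[1] + 1 >= tpl[0]:
--             current_tuple = (current_tuple[0], max(current_tuple[1], tpl[1]))
--         else:
--             merged.append(current_tuple)
--             current_tuple = tpl
--
--     merged.append(current_tuple)
--
--     return merged
--
-- def map_ranges(mapped_seeds, input_range):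
--     overlapping_tuples = []
--
--     for tuple1 in mapped_seeds:
--         for tuple2 in input_range:
--             overlap_start = max(tuple1[0], tuple2[0])
--             overlap_end = min(tuple1[1], tuple2[1])
--
--             if overlap_start < overlap_end:
--                 modifier = tuple2[2]
--                 overlapping_tuples.append((overlap_start + modifier, overlap_end + modifier))
--
--     return merge_adjacent_ranges(overlapping_tuples)
-- ===== SOURCE B (Python) =====
-- def map_ranges(mapped_seeds, input_range):
--     spans = sorted(((max(a, c) + m, min(b, d) + m)
--                     for a, b in mapped_seeds
--                     for c, d, m in input_range
--                     if max(a, c) < min(b, d)),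
--                    key=lambda s: s[1])
--     n = len(spans)
--     cuts = [0] + [i for i in range(1, n) if spans[i - 1][1] + 1 < spans[i][0]] + [n]
--     return [(spans[lo][0], spans[hi - 1][1]) for lo, hi in zip(cuts, cuts[1:])]
-- ===== Notes on version B (the rewrite author's own statement) =====
-- stated objective: alternative
-- what changed: B replaces A's stateful merge sweep (current tuple, running max, helper that re-sorts) by a staged index pipeline: one comprehension builds the shifted overlap spans, one sort by end, then the list of cut positions where consecutive spans do not touch is computed, and each slice between consecutive cuts is emitted as (start of its first span, end of its last span).
import Mathlib
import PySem

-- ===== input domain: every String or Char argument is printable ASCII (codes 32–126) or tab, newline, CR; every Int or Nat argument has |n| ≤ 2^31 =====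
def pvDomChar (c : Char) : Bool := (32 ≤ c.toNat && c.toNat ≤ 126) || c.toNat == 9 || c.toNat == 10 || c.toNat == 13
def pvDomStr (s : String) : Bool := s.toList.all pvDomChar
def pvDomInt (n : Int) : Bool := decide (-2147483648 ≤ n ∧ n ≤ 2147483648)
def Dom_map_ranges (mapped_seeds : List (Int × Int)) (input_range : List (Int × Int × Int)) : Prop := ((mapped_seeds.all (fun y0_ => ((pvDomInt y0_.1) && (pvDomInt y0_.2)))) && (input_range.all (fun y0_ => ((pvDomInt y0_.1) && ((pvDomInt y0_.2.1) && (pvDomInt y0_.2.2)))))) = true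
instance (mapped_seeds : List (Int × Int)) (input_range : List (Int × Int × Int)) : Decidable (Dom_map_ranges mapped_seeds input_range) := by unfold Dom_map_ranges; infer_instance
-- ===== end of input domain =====

-- B replaces A's stateful merge sweep (current tuple, running max, helper with a re-sort) by a
-- staged index pipeline: build the shifted overlap spans in one comprehension, sort once by end,
-- compute the list of cut positions where consecutive spans do not touch, and emit for each slice
-- between consecutive cuts the pair (start of its first span, end of its last span).
-- Equality of the RETURN value is proved on Pre_ below ('alternative'; no speed claim).

-- ===== PORT A =====
-- A's helper merge_adjacent_ranges; seed_ranges[0] raises IndexError on [], excluded by Pre_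
def merge_adjacent_ranges (seed_ranges : List (Int × Int)) : List (Int × Int) :=
  let ss := PySem.List.sorted seed_ranges (fun x => x.2) false
  match ss with
  | [] => []  -- Python raises IndexError here (seed_ranges[0]); Pre_ excludes this case
  | c0 :: rest =>
    let st := rest.foldl (fun (st : List (Int × Int) × (Int × Int)) tpl =>
      if st.2.2 + 1 ≥ tpl.1 then (st.1, (st.2.1, max st.2.2 tpl.2))
      else (st.1 ++ [st.2], tpl)) ([], c0)
    st.1 ++ [st.2]

def map_ranges (mapped_seeds : List (Int × Int)) (input_range : List (Int × Int × Int)) : List (Int × Int) :=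
  let overlapping_tuples := mapped_seeds.foldl (fun acc t1 =>
    input_range.foldl (fun acc t2 =>
      if max t1.1 t2.1 < min t1.2 t2.2.1
      then acc ++ [(max t1.1 t2.1 + t2.2.2, min t1.2 t2.2.1 + t2.2.2)]
      else acc) acc) []
  merge_adjacent_ranges overlapping_tuples

-- ===== PORT B =====
def map_ranges_alt (mapped_seeds : List (Int × Int)) (input_range : List (Int × Int × Int)) : List (Int × Int) :=
  -- spans = sorted(<comprehension>, key=lambda s: s[1])
  let spans := PySem.List.sorted
    (mapped_seeds.flatMap (fun t1 => input_range.filterMap (fun t2 =>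
      if max t1.1 t2.1 < min t1.2 t2.2.1
      then some (max t1.1 t2.1 + t2.2.2, min t1.2 t2.2.1 + t2.2.2)
      else none)))
    (fun s => s.2) false
  -- cuts = [0] + [i for i in range(1, n) if spans[i-1][1] + 1 < spans[i][0]] + [n]
  let cuts : List Int := [0] ++ (PySem.List.pyRange 1 (spans.length : Int) 1).filter
      (fun i => decide ((PySem.List.pyGetD spans (i-1) ((0:Int),(0:Int))).2 + 1
                        < (PySem.List.pyGetD spans i ((0:Int),(0:Int))).1))
    ++ [(spans.length : Int)]
  -- [(spans[lo][0], spans[hi-1][1]) for lo, hi in zip(cuts, cuts[1:])]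
  -- (inside Pre_ every index is in range, so pyGetD's default is never used)
  (cuts.zip (cuts.drop 1)).map (fun p =>
    ((PySem.List.pyGetD spans p.1 ((0:Int),(0:Int))).1,
     (PySem.List.pyGetD spans (p.2 - 1) ((0:Int),(0:Int))).2))

-- ===== PRECONDITION & SPEC =====
-- Pre_ excludes exactly the inputs where no seed interval overlaps any input range: there both
-- programs raise IndexError (A on overlapping_tuples[0], B on spans[-1]) and return nothing.
def Pre_map_ranges (mapped_seeds : List (Int × Int)) (input_range : List (Int × Int × Int)) : Prop :=
  ∃ t1 ∈ mapped_seeds, ∃ t2 ∈ input_range, max t1.1 t2.1 < min t1.2 t2.2.1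
instance (mapped_seeds : List (Int × Int)) (input_range : List (Int × Int × Int)) : Decidable (Pre_map_ranges mapped_seeds input_range) := by unfold Pre_map_ranges; infer_instance

def pvWitness_map_ranges : (List (Int × Int)) × (List (Int × Int × Int)) := ([(0, 10)], [(0, 10, 5)])

def Spec_map_ranges (mapped_seeds : List (Int × Int)) (input_range : List (Int × Int × Int)) (out : List (Int × Int)) : Prop := out = map_ranges_alt mapped_seeds input_range
instance (mapped_seeds : List (Int × Int)) (input_range : List (Int × Int × Int)) (out : List (Int × Int)) : Decidable (Spec_map_ranges mapped_seeds input_range out) := by unfold Spec_map_ranges; infer_instance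

-- ===== CLAIM (what is proved, stated in full; the proofs are below) =====
def Claim_equal_map_ranges : Prop := ∀ (mapped_seeds : List (Int × Int)) (input_range : List (Int × Int × Int)), Dom_map_ranges mapped_seeds input_range → Pre_map_ranges mapped_seeds input_range → Spec_map_ranges mapped_seeds input_range (map_ranges mapped_seeds input_range)

-- ===== LEMMAS AND PROOFS =====

-- A's raw overlap list (row-major), as spans (start, end); also B's comprehension
def spansA (mapped_seeds : List (Int × Int)) (input_range : List (Int × Int × Int)) : List (Int × Int) :=
  mapped_seeds.flatMap (fun t1 => input_range.filterMap (fun t2 =>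
    if max t1.1 t2.1 < min t1.2 t2.2.1
    then some (max t1.1 t2.1 + t2.2.2, min t1.2 t2.2.1 + t2.2.2)
    else none))

-- reference merge: group a span list into maximal runs of touching neighbours
def mergeSpec : List (Int × Int) → List (Int × Int)
  | [] => []
  | x :: xs =>
    match mergeSpec xs with
    | [] => [x]
    | y :: ys => if y.1 ≤ x.2 + 1 then (x.1, y.2) :: ys else x :: y :: ys

-- B's pieces, named for the proof
def brkB (l : List (Int × Int)) (i : Int) : Bool :=
  decide ((PySem.List.pyGetD l (i-1) ((0:Int),(0:Int))).2 + 1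
          < (PySem.List.pyGetD l i ((0:Int),(0:Int))).1)

def tcuts (l : List (Int × Int)) : List Int :=
  (PySem.List.pyRange 1 (l.length : Int) 1).filter (brkB l) ++ [(l.length : Int)]

def emitB (l : List (Int × Int)) (c : List Int) : List (Int × Int) :=
  (c.zip (c.drop 1)).map (fun p =>
    ((PySem.List.pyGetD l p.1 ((0:Int),(0:Int))).1,
     (PySem.List.pyGetD l (p.2 - 1) ((0:Int),(0:Int))).2))

lemma filter_map_eq_filterMap {a b : Type} (p : a -> Bool) (f : a -> b) (l : List a) :
    (l.filter p).map f = l.filterMap (fun x => if p x then some (f x) else none) := by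
  induction l with
  | nil => rfl
  | cons x l ih => by_cases h : p x <;> simp [h, ih]

lemma map_ranges_eq_merge (ms : List (Int × Int)) (ir : List (Int × Int × Int)) :
    map_ranges ms ir = merge_adjacent_ranges (spansA ms ir) := by
  unfold map_ranges
  have hbody : (fun (acc : List (Int × Int)) (t1 : Int × Int) => ir.foldl (fun acc t2 =>
      if max t1.1 t2.1 < min t1.2 t2.2.1
      then acc ++ [(max t1.1 t2.1 + t2.2.2, min t1.2 t2.2.1 + t2.2.2)]
      else acc) acc)
      = (fun acc t1 => acc ++ ir.filterMap (fun t2 =>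
        if max t1.1 t2.1 < min t1.2 t2.2.1
        then some (max t1.1 t2.1 + t2.2.2, min t1.2 t2.2.1 + t2.2.2)
        else none)) := by
    funext acc t1
    have h := PySem.List.foldl_append_if
      (fun t2 : Int × Int × Int => decide (max t1.1 t2.1 < min t1.2 t2.2.1))
      (fun t2 : Int × Int × Int => (max t1.1 t2.1 + t2.2.2, min t1.2 t2.2.1 + t2.2.2)) ir acc
    simp only [decide_eq_true_eq] at h
    rw [h, filter_map_eq_filterMap]
    simp only [decide_eq_true_eq]
  simp only [hbody, PySem.List.foldl_append_eq_flatMap]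
  rfl

lemma mem_spansA (ms : List (Int × Int)) (ir : List (Int × Int × Int)) (x : Int × Int) :
    x ∈ spansA ms ir ↔ ∃ t1 ∈ ms, ∃ t2 ∈ ir, max t1.1 t2.1 < min t1.2 t2.2.1 ∧
      x = (max t1.1 t2.1 + t2.2.2, min t1.2 t2.2.1 + t2.2.2) := by
  simp only [spansA, List.mem_flatMap, List.mem_filterMap, Option.ite_none_right_eq_some,
    Option.some.injEq]
  constructor
  · rintro ⟨t1, h1, t2, h2, h, rfl⟩
    exact ⟨t1, h1, t2, h2, h, rfl⟩
  · rintro ⟨t1, h1, t2, h2, h, rfl⟩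
    exact ⟨t1, h1, t2, h2, h, rfl⟩

-- A's forward fold over an end-sorted list computes mergeSpec
lemma merge_fold_eq_mergeSpec : ∀ (xs : List (Int × Int)) (merged : List (Int × Int)) (cur : Int × Int),
    (∀ y ∈ xs, cur.2 ≤ y.2) → xs.Pairwise (fun a b => a.2 ≤ b.2) →
    (xs.foldl (fun (st : List (Int × Int) × (Int × Int)) tpl =>
        if st.2.2 + 1 ≥ tpl.1 then (st.1, (st.2.1, max st.2.2 tpl.2))
        else (st.1 ++ [st.2], tpl)) (merged, cur)).1
      ++ [(xs.foldl (fun (st : List (Int × Int) × (Int × Int)) tpl =>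
        if st.2.2 + 1 ≥ tpl.1 then (st.1, (st.2.1, max st.2.2 tpl.2))
        else (st.1 ++ [st.2], tpl)) (merged, cur)).2]
      = merged ++ mergeSpec (cur :: xs) := by
  intro xs
  induction xs with
  | nil => intro merged cur _ _; simp [mergeSpec]
  | cons t xs ih =>
    intro merged cur hle hpw
    have hct : cur.2 ≤ t.2 := hle t List.mem_cons_self
    simp only [List.foldl_cons]
    by_cases h : cur.2 + 1 ≥ t.1
    · rw [if_pos h]
      have hmax : max cur.2 t.2 = t.2 := max_eq_right hct
      rw [hmax]
      rw [ih merged (cur.1, t.2)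
        (fun y hy => (List.pairwise_cons.mp hpw).1 y hy)
        (List.pairwise_cons.mp hpw).2]
      congr 1
      show mergeSpec ((cur.1, t.2) :: xs) = mergeSpec (cur :: t :: xs)
      cases hm : mergeSpec xs with
      | nil => simp [mergeSpec, hm]; omega
      | cons z zs =>
        by_cases hz : z.1 ≤ t.2 + 1 <;>
          simp [mergeSpec, hm, hz] <;> omega
    · rw [if_neg h]
      rw [ih (merged ++ [cur]) t
        (fun y hy => (List.pairwise_cons.mp hpw).1 y hy)
        (List.pairwise_cons.mp hpw).2]
      rw [List.append_assoc]
      congr 1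
      show [cur] ++ mergeSpec (t :: xs) = mergeSpec (cur :: t :: xs)
      cases hm : mergeSpec xs with
      | nil => simp [mergeSpec, hm]; omega
      | cons z zs =>
        by_cases hz : z.1 ≤ t.2 + 1 <;>
          simp [mergeSpec, hm, hz] <;> omega

-- ===== B-side lemmas =====

lemma pyGetD_cons_succ' (x : Int × Int) (xs : List (Int × Int)) (j : Int) (hj : 0 ≤ j)
    (d : Int × Int) :
    PySem.List.pyGetD (x :: xs) (j + 1) d = PySem.List.pyGetD xs j d := by
  obtain ⟨k, rfl⟩ := Int.eq_ofNat_of_zero_le hj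
  have h1 : ((k : Int) + 1) = ((k + 1 : Nat) : Int) := by push_cast; ring
  rw [h1, PySem.List.pyGetD_natCast, PySem.List.pyGetD_natCast]
  simp

lemma pyRange_shift (a b : Int) :
    PySem.List.pyRange (a + 1) (b + 1) 1 = (PySem.List.pyRange a b 1).map (· + 1) := by
  rw [PySem.List.pyRange_one, PySem.List.pyRange_one, List.map_map]
  have hn : (b + 1 - (a + 1)).toNat = (b - a).toNat := by omega
  rw [hn]
  apply List.map_congr_left
  intro k _
  simp
  ring

lemma tcuts_ne_nil (l : List (Int × Int)) : tcuts l ≠ [] := by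
  unfold tcuts
  simp

lemma mem_tcuts_one_le (l : List (Int × Int)) (hl : l ≠ []) :
    ∀ i ∈ tcuts l, 1 ≤ i := by
  intro i hi
  unfold tcuts at hi
  rcases List.mem_append.mp hi with h | h
  · exact (PySem.List.mem_pyRange_one.mp (List.mem_of_mem_filter h)).1
  · have : i = (l.length : Int) := by simpa using h
    subst this
    have : 1 ≤ l.length := List.length_pos_of_ne_nil hl
    omega

-- shifting every cut by one while consing one span on the front leaves the emitted list unchanged
lemma emitB_shift (x : Int × Int) (xs : List (Int × Int)) (c : List Int)
    (h0 : ∀ i ∈ c, 0 ≤ i) (h1 : ∀ i ∈ c.drop 1, 1 ≤ i) :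
    emitB (x :: xs) (c.map (· + 1)) = emitB xs c := by
  unfold emitB
  rw [← List.map_drop, List.zip_map, List.map_map]
  apply List.map_congr_left
  intro p hp
  obtain ⟨hp1, hp2⟩ := List.of_mem_zip hp
  have h0' : 0 ≤ p.1 := h0 p.1 hp1
  have h1' : 1 ≤ p.2 := h1 p.2 hp2
  simp only [Function.comp, Prod.map]
  have e1 : PySem.List.pyGetD (x :: xs) (p.1 + 1) ((0:Int),(0:Int))
      = PySem.List.pyGetD xs p.1 ((0:Int),(0:Int)) := pyGetD_cons_succ' x xs p.1 h0' _
  have e2 : PySem.List.pyGetD (x :: xs) (p.2 + 1 - 1) ((0:Int),(0:Int))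
      = PySem.List.pyGetD xs (p.2 - 1) ((0:Int),(0:Int)) := by
    have hr : p.2 + 1 - 1 = (p.2 - 1) + 1 := by ring
    rw [hr, pyGetD_cons_succ' x xs (p.2 - 1) (by omega)]
  rw [e1, e2]

lemma tcuts_cons (x z : Int × Int) (t : List (Int × Int)) :
    tcuts (x :: z :: t) = (if x.2 + 1 < z.1 then [(1:Int)] else []) ++ (tcuts (z :: t)).map (· + 1) := by
  unfold tcuts
  have hm1 : (1:Int) ≤ ((z :: t).length : Int) := by simp
  have hlen : ((x :: z :: t).length : Int) = ((z :: t).length : Int) + 1 := by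
    simp [List.length_cons]
  rw [hlen]
  have hr : PySem.List.pyRange 1 (((z :: t).length : Int) + 1) 1
      = 1 :: (PySem.List.pyRange 1 ((z :: t).length : Int) 1).map (· + 1) := by
    rw [PySem.List.pyRange_one_cons (by omega)]
    congr 1
    exact pyRange_shift 1 _
  rw [hr]
  rw [List.filter_cons]
  have hb1 : brkB (x :: z :: t) 1 = decide (x.2 + 1 < z.1) := by
    have hz1 : PySem.List.pyGetD (x :: z :: t) 1 ((0:Int),(0:Int)) = z := by
      have h1 : (1:Int) = (0:Int) + 1 := by norm_num
      rw [h1, pyGetD_cons_succ' x (z :: t) 0 le_rfl, PySem.List.pyGetD_zero_cons]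
    have h0 : PySem.List.pyGetD (x :: z :: t) ((1:Int) - 1) ((0:Int),(0:Int)) = x := by
      norm_num [PySem.List.pyGetD_zero_cons]
    unfold brkB
    rw [hz1, h0]
  have hfm : (((PySem.List.pyRange 1 ((z :: t).length : Int) 1).map (· + 1)).filter (brkB (x :: z :: t)))
      = ((PySem.List.pyRange 1 ((z :: t).length : Int) 1).filter (brkB (z :: t))).map (· + 1) := by
    rw [List.filter_map]
    congr 1
    apply List.filter_congr
    intro j hj
    have hj1 : 1 ≤ j := (PySem.List.mem_pyRange_one.mp hj).1
    simp only [Function.comp]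
    unfold brkB
    have e1 : j + 1 - 1 = (j - 1) + 1 := by ring
    rw [e1, pyGetD_cons_succ' x (z :: t) (j - 1) (by omega),
        pyGetD_cons_succ' x (z :: t) j (by omega)]
  by_cases hb : x.2 + 1 < z.1
  · rw [if_pos hb]
    simp only [hb1, hb, decide_true, if_true, hfm]
    simp [List.map_append]
  · rw [if_neg hb]
    simp only [hb1, hb, decide_false, hfm]
    simp [List.map_append]

lemma mergeSpec_cons_head (z : Int × Int) (t : List (Int × Int)) :
    ∃ e ys, mergeSpec (z :: t) = (z.1, e) :: ys := by
  cases h : mergeSpec t with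
  | nil => exact ⟨z.2, [], by simp [mergeSpec, h]⟩
  | cons w ws =>
    by_cases hw : w.1 ≤ z.2 + 1
    · exact ⟨w.2, ws, by simp [mergeSpec, h, hw]⟩
    · exact ⟨z.2, w :: ws, by simp [mergeSpec, h, hw]⟩

-- splitting off the first pair of consecutive cuts
lemma emitB_cons_cons (l : List (Int × Int)) (a b : Int) (K : List Int) :
    emitB l (a :: b :: K)
      = ((PySem.List.pyGetD l a ((0:Int),(0:Int))).1,
         (PySem.List.pyGetD l (b - 1) ((0:Int),(0:Int))).2) :: emitB l (b :: K) := rfl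

-- B's cut/slice pipeline computes mergeSpec on any nonempty span list
lemma emitB_cuts_eq_mergeSpec :
    ∀ (xs : List (Int × Int)) (x : Int × Int),
      emitB (x :: xs) ((0:Int) :: tcuts (x :: xs)) = mergeSpec (x :: xs) := by
  intro xs
  induction xs with
  | nil =>
    intro x
    unfold tcuts emitB
    simp [PySem.List.pyRange_one_eq_nil, mergeSpec]
  | cons z t ih =>
    intro x
    obtain ⟨u, T', hm⟩ := List.exists_cons_of_ne_nil (tcuts_ne_nil (z :: t))
    have hu1 : 1 ≤ u := mem_tcuts_one_le (z :: t) (by simp) u (by rw [hm]; exact List.mem_cons_self)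
    have hc0 : ∀ i ∈ (0:Int) :: tcuts (z :: t), 0 ≤ i := by
      intro i hi
      rcases List.mem_cons.mp hi with h | h
      · omega
      · have := mem_tcuts_one_le (z :: t) (by simp) i h; omega
    have hc1 : ∀ i ∈ ((0:Int) :: tcuts (z :: t)).drop 1, 1 ≤ i := by
      intro i hi
      exact mem_tcuts_one_le (z :: t) (by simp) i (by simpa using hi)
    obtain ⟨e, ys, hy⟩ := mergeSpec_cons_head z t
    rw [tcuts_cons]
    by_cases hb : x.2 + 1 < z.1
    · rw [if_pos hb]
      -- cuts = 0 :: 1 :: map (+1) (tcuts (z::t)) = 0 :: (0 :: tcuts (z::t)).map (+1)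
      have hcuts : ((0:Int) :: ([(1:Int)] ++ (tcuts (z :: t)).map (· + 1)))
          = (0:Int) :: (1:Int) :: (tcuts (z :: t)).map (· + 1) := rfl
      rw [hcuts, emitB_cons_cons]
      have hhead : ((PySem.List.pyGetD (x :: z :: t) 0 ((0:Int),(0:Int))).1,
          (PySem.List.pyGetD (x :: z :: t) ((1:Int) - 1) ((0:Int),(0:Int))).2) = x := by
        norm_num [PySem.List.pyGetD_zero_cons]
      have htail : emitB (x :: z :: t) ((1:Int) :: (tcuts (z :: t)).map (· + 1))
          = mergeSpec (z :: t) := by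
        have hsh : (1:Int) :: (tcuts (z :: t)).map (· + 1)
            = ((0:Int) :: tcuts (z :: t)).map (· + 1) := by simp
        rw [hsh, emitB_shift x (z :: t) _ hc0 hc1]
        exact ih z
      rw [hhead, htail]
      have hz : ¬ (z.1 ≤ x.2 + 1) := by omega
      have hmerge : mergeSpec (x :: z :: t) = x :: mergeSpec (z :: t) := by
        rw [mergeSpec, hy]
        simp [hz]
      rw [hmerge]
    · rw [if_neg hb]
      have hcuts : ((0:Int) :: (([] : List Int) ++ (tcuts (z :: t)).map (· + 1)))
          = (0:Int) :: (u + 1) :: T'.map (· + 1) := by rw [hm]; rfl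
      rw [hcuts, emitB_cons_cons]
      -- head of B's output
      have hg0 : PySem.List.pyGetD (x :: z :: t) 0 ((0:Int),(0:Int)) = x :=
        PySem.List.pyGetD_zero_cons _ _ _
      have hgu : PySem.List.pyGetD (x :: z :: t) (u + 1 - 1) ((0:Int),(0:Int))
          = PySem.List.pyGetD (z :: t) (u - 1) ((0:Int),(0:Int)) := by
        have hr : u + 1 - 1 = (u - 1) + 1 := by ring
        rw [hr, pyGetD_cons_succ' x (z :: t) (u - 1) (by omega)]
      -- tail of B's output shifts down to the cuts of (z::t)
      have htail : emitB (x :: z :: t) ((u + 1) :: T'.map (· + 1))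
          = emitB (z :: t) (u :: T') := by
        have hmm : (u + 1) :: T'.map (· + 1) = (u :: T').map (· + 1) := rfl
        rw [hmm]
        apply emitB_shift
        · intro i hi
          have := mem_tcuts_one_le (z :: t) (by simp) i (by rw [hm]; exact hi); omega
        · intro i hi
          exact mem_tcuts_one_le (z :: t) (by simp) i
            (by rw [hm]; exact List.mem_cons_of_mem u (by simpa using hi))
      -- relate to the IH at z
      have hih := ih z
      rw [hm, emitB_cons_cons, hy] at hih
      have hhead' : ((PySem.List.pyGetD (z :: t) 0 ((0:Int),(0:Int))).1,
          (PySem.List.pyGetD (z :: t) (u - 1) ((0:Int),(0:Int))).2)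
          = (z.1, (PySem.List.pyGetD (z :: t) (u - 1) ((0:Int),(0:Int))).2) := by
        rw [PySem.List.pyGetD_zero_cons]
      rw [hhead'] at hih
      have he : (PySem.List.pyGetD (z :: t) (u - 1) ((0:Int),(0:Int))).2 = e :=
        congrArg Prod.snd (List.head_eq_of_cons_eq hih)
      have hys : emitB (z :: t) (u :: T') = ys := List.tail_eq_of_cons_eq hih
      rw [hg0, hgu, htail, he, hys]
      have hz : z.1 ≤ x.2 + 1 := by omega
      have hmerge : mergeSpec (x :: z :: t) = (x.1, e) :: ys := by
        rw [mergeSpec, hy]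
        simp [hz]
      rw [hmerge]

-- ===== VERDICT (by name: the statement is the Claim_ definition above) =====
theorem map_ranges_spec : Claim_equal_map_ranges := by
  intro ms ir _hdom hpre
  unfold Spec_map_ranges
  rw [map_ranges_eq_merge]
  have hB : map_ranges_alt ms ir
      = emitB (PySem.List.sorted (spansA ms ir) (fun s => s.2) false)
          ((0:Int) :: tcuts (PySem.List.sorted (spansA ms ir) (fun s => s.2) false)) := rfl
  rw [hB]
  have hne : spansA ms ir ≠ [] := by
    obtain ⟨t1, h1, t2, h2, hov⟩ := hpre
    exact List.ne_nil_of_mem ((mem_spansA ms ir _).mpr ⟨t1, h1, t2, h2, hov, rfl⟩)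
  unfold merge_adjacent_ranges
  have hpw := PySem.List.sorted_pairwise (spansA ms ir) (fun x : Int × Int => x.2)
  obtain ⟨c, rest, hcr⟩ : ∃ c rest,
      PySem.List.sorted (spansA ms ir) (fun x : Int × Int => x.2) false = c :: rest := by
    cases hs : PySem.List.sorted (spansA ms ir) (fun x : Int × Int => x.2) false with
    | nil => exact absurd ((PySem.List.sorted_eq_nil_iff _ _ _).mp hs) hne
    | cons c rest => exact ⟨c, rest, rfl⟩
  rw [hcr] at hpw ⊢
  rw [emitB_cuts_eq_mergeSpec]
  simpa using merge_fold_eq_mergeSpec rest [] c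
    (List.pairwise_cons.mp hpw).1 (List.pairwise_cons.mp hpw).2
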